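-- pv_equiv track=rewrite | github.com/jofrisch/connect4 | board.py | contains_4_consecutive_coins
-- ===== SOURCE A (Python) =====
-- def contains_4_consecutive_coins(values):
--     size = len(values)
--     if size < 4:
--         return False
--     else:
--         for i in range(size - 3):
--             if sum(values[i: i + 4]) == 4 or sum(values[i: i + 4]) == -4:
--                 return True
--         return False
-- ===== SOURCE B (Python) =====
-- def contains_4_consecutive_coins(values):
--     n = len(values)
--     if n < 4:
--         return False
--     # prefix sums: prefix[k] = sum(values[:k]), built once
--     prefix = [0]
--     s = 0
--     for x in values:
--         s += x
--         prefix.append(s)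
--     return any(abs(prefix[i + 4] - prefix[i]) == 4 for i in range(n - 3))
-- ===== Notes on version B (the rewrite author's own statement) =====
-- stated objective: faster
-- what changed: B precomputes a prefix-sum table once and tests each window by a difference of two prefix entries (abs == 4), instead of allocating and summing each 4-element slice twice inside the loop.
import Mathlib
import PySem

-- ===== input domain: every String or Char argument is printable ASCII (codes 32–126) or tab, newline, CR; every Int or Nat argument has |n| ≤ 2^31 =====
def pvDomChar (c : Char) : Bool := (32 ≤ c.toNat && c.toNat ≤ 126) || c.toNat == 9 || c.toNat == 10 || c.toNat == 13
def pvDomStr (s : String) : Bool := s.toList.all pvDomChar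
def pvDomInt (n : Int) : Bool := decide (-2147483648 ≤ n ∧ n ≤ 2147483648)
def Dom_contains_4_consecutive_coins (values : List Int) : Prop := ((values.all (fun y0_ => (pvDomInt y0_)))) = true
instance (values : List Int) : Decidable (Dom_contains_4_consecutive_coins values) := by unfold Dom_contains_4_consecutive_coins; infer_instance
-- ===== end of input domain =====

-- B replaces per-window slice re-summing by a prefix-sum table and window differences (same O(n) asymptotics, measured constant-factor speedup).


-- ===== PORT A =====
-- for i in range(size-3): if sum(values[i:i+4]) == 4 or sum(values[i:i+4]) == -4: return True; return False
def contains_4_consecutive_coins (values : List Int) : Bool :=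
  let size : Int := values.length
  if size < 4 then false
  else
    (PySem.List.pyRange 0 (size - 3) 1).any (fun i =>
      (PySem.List.slice values (some i) (some (i + 4))).sum == 4 ||
      (PySem.List.slice values (some i) (some (i + 4))).sum == -4)

-- ===== PORT B =====
-- the prefix-building loop of Source B: out = [s]; for x in xs: s += x; out.append(s)
def pvPrefixB (s : Int) : List Int → List Int
  | [] => [s]
  | x :: xs => s :: pvPrefixB (s + x) xs

def contains_4_consecutive_coins_alt (values : List Int) : Bool :=
  let n : Int := values.length
  if n < 4 then false
  else
    let pfx := pvPrefixB 0 values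
    (PySem.List.pyRange 0 (n - 3) 1).any (fun i =>
      (PySem.List.pyGetD pfx (i + 4) 0 - PySem.List.pyGetD pfx i 0).natAbs == 4)

-- ===== PRECONDITION & SPEC =====
def Spec_contains_4_consecutive_coins (values : List Int) (out : Bool) : Prop := out = contains_4_consecutive_coins_alt values
instance (values : List Int) (out : Bool) : Decidable (Spec_contains_4_consecutive_coins values out) := by unfold Spec_contains_4_consecutive_coins; infer_instance

-- ===== CLAIM (what is proved, stated in full; the proofs are below) =====
def Claim_equal_contains_4_consecutive_coins : Prop := ∀ (values : List Int), Dom_contains_4_consecutive_coins values → Spec_contains_4_consecutive_coins values (contains_4_consecutive_coins values)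

-- ===== LEMMAS AND PROOFS =====

-- any over the same list with pointwise-equal predicates (on members)
theorem pvAnyCongrMem {α : Type} {l : List α} {p q : α → Bool}
    (h : ∀ a ∈ l, p a = q a) : l.any p = l.any q := by
  induction l with
  | nil => rfl
  | cons x xs ih =>
    simp only [List.any_cons, h x (by simp), ih (fun a ha => h a (by simp [ha]))]

-- pvPrefixB indexes to partial sums
theorem pvPrefixB_getD (xs : List Int) (s : Int) (k : Nat) (hk : k ≤ xs.length) :
    (pvPrefixB s xs).getD k 0 = s + (xs.take k).sum := by
  induction xs generalizing s k with
  | nil => cases k with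
    | zero => simp [pvPrefixB]
    | succ k => simp at hk
  | cons x xs ih =>
    cases k with
    | zero => simp [pvPrefixB]
    | succ k =>
      simp only [pvPrefixB, List.getD_cons_succ, List.take_succ_cons, List.sum_cons]
      rw [ih (s + x) k (by simpa using hk)]
      ring

theorem pvPrefixB_length (xs : List Int) (s : Int) : (pvPrefixB s xs).length = xs.length + 1 := by
  induction xs generalizing s with
  | nil => simp [pvPrefixB]
  | cons x xs ih => simp [pvPrefixB, ih]

theorem window_eq (values : List Int) (i : Int) (h0 : 0 ≤ i) (h4 : i + 4 ≤ (values.length : Int)) :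
    (PySem.List.slice values (some i) (some (i + 4))).sum
      = PySem.List.pyGetD (pvPrefixB 0 values) (i + 4) 0 - PySem.List.pyGetD (pvPrefixB 0 values) i 0 := by
  have hi4 : (0:Int) ≤ i + 4 := by omega
  rw [PySem.List.slice_toNat values h0 hi4]
  have hlen := pvPrefixB_length values 0
  rw [PySem.List.pyGetD_eq_getElem (pvPrefixB 0 values) 0 hi4 (by rw [hlen]; push_cast; omega),
      PySem.List.pyGetD_eq_getElem (pvPrefixB 0 values) 0 h0 (by rw [hlen]; push_cast; omega),
      ← List.getD_eq_getElem _ 0, ← List.getD_eq_getElem _ 0]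
  rw [pvPrefixB_getD values 0 (i+4).toNat (by omega), pvPrefixB_getD values 0 i.toNat (by omega)]
  have ht : (i+4).toNat = i.toNat + 4 := by omega
  rw [ht, List.take_add, List.sum_append]
  have h4' : i.toNat + 4 - i.toNat = 4 := by omega
  rw [h4']
  ring

-- ===== VERDICT (by name: the statement is the Claim_ definition above) =====
theorem contains_4_consecutive_coins_spec : Claim_equal_contains_4_consecutive_coins := by
  intro values _
  unfold Spec_contains_4_consecutive_coins contains_4_consecutive_coins contains_4_consecutive_coins_alt
  simp only
  split
  · rfl
  · rename_i h
    apply pvAnyCongrMem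
    intro i hi
    rw [PySem.List.mem_pyRange_one] at hi
    rw [window_eq values i hi.1 (by omega)]
    generalize PySem.List.pyGetD (pvPrefixB 0 values) (i + 4) 0 - PySem.List.pyGetD (pvPrefixB 0 values) i 0 = d
    rw [Bool.eq_iff_iff]
    simp only [Bool.or_eq_true, beq_iff_eq]
    omega
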